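-- pv_equiv track=rewrite | github.com/Dolacone/IdleVillage | src/core/engine.py | _building_level_base_xp
-- ===== SOURCE A (Python) =====
-- def _building_level_base_xp(level: int):
--     total_required = 0
--     next_required = 1000
--     current_level = max(0, int(level or 0))
--
--     for _ in range(current_level):
--         total_required += next_required
--         next_required *= 2
--
--     return total_required
-- ===== SOURCE B (Python) =====
-- def _building_level_base_xp(level: int):
--     m = max(0, int(level or 0))
--     return 1000 * ((1 << m) - 1)
-- ===== Notes on version B (the rewrite author's own statement) =====
-- stated objective: simpler
-- what changed: Replaces the per-level doubling loop with a closed-form geometric-sum expression computed by a single bit shift.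
import Mathlib
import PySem

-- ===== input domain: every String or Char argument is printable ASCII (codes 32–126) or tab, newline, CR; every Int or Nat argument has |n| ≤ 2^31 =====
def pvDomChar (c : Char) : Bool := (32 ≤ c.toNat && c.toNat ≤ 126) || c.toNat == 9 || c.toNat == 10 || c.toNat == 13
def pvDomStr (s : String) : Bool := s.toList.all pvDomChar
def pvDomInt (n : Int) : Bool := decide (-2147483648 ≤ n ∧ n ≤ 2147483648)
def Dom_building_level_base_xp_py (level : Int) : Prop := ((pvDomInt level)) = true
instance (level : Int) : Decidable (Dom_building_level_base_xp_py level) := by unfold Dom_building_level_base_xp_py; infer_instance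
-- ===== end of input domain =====

-- B replaces A's doubling loop by a closed-form geometric-sum expression (simpler).

-- ===== PORT A =====
-- loop over range(current_level), state (total_required, next_required)
def building_level_base_xp_py (level : Int) : Int :=
  let current_level : Int := max 0 level
  ((PySem.List.pyRange 0 current_level 1).foldl
    (fun (s : Int × Int) _ => (s.1 + s.2, s.2 * 2)) (0, 1000)).1

-- ===== PORT B =====
def building_level_base_xp_py_alt (level : Int) : Int :=
  let m : Int := max 0 level
  1000 * (2 ^ m.toNat - 1)

-- ===== PRECONDITION & SPEC =====
def Spec_building_level_base_xp_py (level : Int) (out : Int) : Prop := out = building_level_base_xp_py_alt level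
instance (level : Int) (out : Int) : Decidable (Spec_building_level_base_xp_py level out) := by unfold Spec_building_level_base_xp_py; infer_instance

-- ===== CLAIM (what is proved, stated in full; the proofs are below) =====
def Claim_equal_building_level_base_xp_py : Prop := ∀ (level : Int), Dom_building_level_base_xp_py level → Spec_building_level_base_xp_py level (building_level_base_xp_py level)

-- ===== LEMMAS AND PROOFS =====

-- loop invariant of A's fold: the element values are ignored, only the length matters
theorem xp_foldl_closed (l : List Int) (t nr : Int) :
    (l.foldl (fun (s : Int × Int) _ => (s.1 + s.2, s.2 * 2)) (t, nr)) =
      (t + nr * (2 ^ l.length - 1), nr * 2 ^ l.length) := by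
  induction l generalizing t nr with
  | nil => simp
  | cons x xs ih =>
    simp [List.foldl, ih, pow_succ]
    constructor <;> ring

-- ===== VERDICT (by name: the statement is the Claim_ definition above) =====
theorem building_level_base_xp_py_spec : Claim_equal_building_level_base_xp_py := by
  intro level _
  unfold Spec_building_level_base_xp_py building_level_base_xp_py building_level_base_xp_py_alt
  simp only []
  rw [show (max 0 level) = ((max 0 level).toNat : Int) by omega, xp_foldl_closed]
  simp [PySem.List.length_pyRange_one]
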